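-- pv_equiv track=rewrite | github.com/Mimix231/sm64dx | ai_tools/grep_refs.py | offset_to_line_col
-- ===== SOURCE A (Python) =====
-- def offset_to_line_col(starts: list[int], offset: int) -> tuple[int, int]:
--     low = 0
--     high = len(starts) - 1
--     while low <= high:
--         mid = (low + high) // 2
--         if starts[mid] <= offset:
--             low = mid + 1
--         else:
--             high = mid - 1
--     line_index = high
--     line_number = line_index + 1
--     column = offset - starts[line_index] + 1
--     return line_number, column
-- ===== SOURCE B (Python) =====
-- def offset_to_line_col(starts: list[int], offset: int) -> tuple[int, int]:
--     # index-free halving: keep an explicit sublist and a base counter instead of low/high indices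
--     base = 0
--     seg = list(starts)
--     while seg:
--         m = (len(seg) - 1) // 2
--         if seg[m] <= offset:
--             base += m + 1
--             seg = seg[m + 1:]
--         else:
--             seg = seg[:m]
--     line_index = base - 1
--     line_number = line_index + 1
--     column = offset - starts[line_index] + 1
--     return line_number, column
-- ===== Notes on version B (the rewrite author's own statement) =====
-- stated objective: alternative
-- what changed: Replaced the low/high index-pair binary search with an index-free divide-and-conquer that repeatedly halves an explicit sublist (list slices) while advancing a base counter, probing the same elements and so returning A's exact value on every list, sorted or not.
import Mathlib
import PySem

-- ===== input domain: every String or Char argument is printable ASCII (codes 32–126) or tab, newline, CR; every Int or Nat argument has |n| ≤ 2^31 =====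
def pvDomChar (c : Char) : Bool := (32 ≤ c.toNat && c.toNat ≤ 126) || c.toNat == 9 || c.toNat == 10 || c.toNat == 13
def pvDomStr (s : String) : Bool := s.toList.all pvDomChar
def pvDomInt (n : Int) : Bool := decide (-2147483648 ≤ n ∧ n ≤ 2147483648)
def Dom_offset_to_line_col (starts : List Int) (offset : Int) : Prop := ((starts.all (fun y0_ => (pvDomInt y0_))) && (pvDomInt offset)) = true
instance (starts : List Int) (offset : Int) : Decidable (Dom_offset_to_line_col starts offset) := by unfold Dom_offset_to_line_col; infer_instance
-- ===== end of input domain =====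

-- B replaces A's low/high index-pair binary search by an index-free divide-and-conquer on an
-- explicit shrinking sublist with a base counter; it probes the same elements, so it returns
-- A's exact value on every list (alternative formulation, not claimed faster).

-- ===== PORT A =====
-- the while-loop of A; indices probed inside the loop are always in range (0 ≤ low ≤ mid ≤ high ≤ len-1),
-- so '.getD 0' is exact there
def offsetBS (starts : List Int) (offset : Int) (low high : Int) : Int :=
  if _h : low ≤ high then
    let mid := PySem.Int.floordiv (low + high) 2
    if ((PySem.List.pyGet? starts mid).getD 0) ≤ offset then
      offsetBS starts offset (mid + 1) high
    else
      offsetBS starts offset low (mid - 1)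
  else high
termination_by (high + 1 - low).toNat
decreasing_by
  all_goals
    have hb := PySem.Int.floordiv_two_mid_bounds (lo := low) (hi := high) _h
    omega

-- final 'starts[line_index]' raises IndexError exactly when starts = [] (excluded by Pre_);
-- there the port returns the getD default instead
def offset_to_line_col (starts : List Int) (offset : Int) : Int × Int :=
  let line_index := offsetBS starts offset 0 ((starts.length : Int) - 1)
  (line_index + 1, offset - ((PySem.List.pyGet? starts line_index).getD 0) + 1)

-- ===== PORT B =====
-- the 'while seg:' loop of B; the probed index m is always in range (0 ≤ m ≤ len(seg)-1),
-- so '.getD 0' is exact there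
def segHalve (offset base : Int) (seg : List Int) : Int :=
  if _h : seg = [] then base
  else
    let m := PySem.Int.floordiv ((seg.length : Int) - 1) 2
    if ((PySem.List.pyGet? seg m).getD 0) ≤ offset then
      segHalve offset (base + m + 1) (PySem.List.slice seg (some (m + 1)) none)
    else
      segHalve offset base (PySem.List.slice seg none (some m))
termination_by seg.length
decreasing_by
  all_goals
    have hlen : 1 ≤ seg.length := List.length_pos_of_ne_nil _h
    have hm : PySem.Int.floordiv ((seg.length : Int) - 1) 2
        = (((seg.length - 1) / 2 : Nat) : Int) := by
      rw [PySem.Int.floordiv_eq_ediv_of_pos (by norm_num)]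
      omega
  · rw [hm, show ((((seg.length - 1) / 2 : Nat)) : Int) + 1
        = (((seg.length - 1) / 2 + 1 : Nat) : Int) by push_cast; ring,
      PySem.List.slice_from_natCast]
    simp only [List.length_drop]
    omega
  · rw [hm, PySem.List.slice_to_natCast]
    simp only [List.length_take]
    omega

-- final 'starts[line_index]' raises IndexError exactly when starts = [] (excluded by Pre_);
-- there the port returns the getD default instead
def offset_to_line_col_alt (starts : List Int) (offset : Int) : Int × Int :=
  let line_index := segHalve offset 0 starts - 1
  (line_index + 1, offset - ((PySem.List.pyGet? starts line_index).getD 0) + 1)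

-- ===== PRECONDITION & SPEC =====
-- Pre_ excludes only the empty list, on which A (and B alike) raises IndexError at starts[-1].
def Pre_offset_to_line_col (starts : List Int) (offset : Int) : Prop := starts ≠ []
instance (starts : List Int) (offset : Int) : Decidable (Pre_offset_to_line_col starts offset) := by
  unfold Pre_offset_to_line_col; infer_instance

def pvWitness_offset_to_line_col : List Int × Int := ([0, 5, 11], 7)

def Spec_offset_to_line_col (starts : List Int) (offset : Int) (out : Int × Int) : Prop := out = offset_to_line_col_alt starts offset
instance (starts : List Int) (offset : Int) (out : Int × Int) : Decidable (Spec_offset_to_line_col starts offset out) := by unfold Spec_offset_to_line_col; infer_instance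

-- ===== CLAIM (what is proved, stated in full; the proofs are below) =====
def Claim_equal_offset_to_line_col : Prop := ∀ (starts : List Int) (offset : Int), Dom_offset_to_line_col starts offset → Pre_offset_to_line_col starts offset → Spec_offset_to_line_col starts offset (offset_to_line_col starts offset)

-- ===== LEMMAS AND PROOFS =====

-- B's loop on the sublist starts[low:high+1] with base 'low' tracks A's loop on (low, high):
-- the probed element is the same, and the final base is A's final 'high' plus one.
lemma segHalve_eq_offsetBS (starts : List Int) (offset : Int) :
    ∀ (fuel : Nat) (low high : Int), (high + 1 - low).toNat ≤ fuel →
      0 ≤ low → low ≤ high + 1 → high ≤ (starts.length : Int) - 1 →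
      segHalve offset low ((starts.drop low.toNat).take (high + 1 - low).toNat)
        = offsetBS starts offset low high + 1 := by
  intro fuel
  induction fuel with
  | zero =>
    intro low high hf h0 hlh hn
    have ht : (high + 1 - low).toNat = 0 := by omega
    rw [ht]
    rw [segHalve, offsetBS]
    rw [dif_pos (by simp), dif_neg (by omega)]
    omega
  | succ k ih =>
    intro low high hf h0 hlh hn
    by_cases hcond : low ≤ high
    · -- loop body runs on both sides
      set t : Nat := (high + 1 - low).toNat with htdef
      have hdlen : ((starts.drop low.toNat).length : Int) = (starts.length : Int) - low := by
        simp only [List.length_drop]; omega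
      have hseglen : ((starts.drop low.toNat).take t).length = t := by
        simp only [List.length_take, List.length_drop]; omega
      set seg : List Int := (starts.drop low.toNat).take t with hsegdef
      have hsegne : seg ≠ [] := by
        intro hnil
        have := congrArg List.length hnil
        simp only [hseglen, List.length_nil] at this
        omega
      rw [segHalve, dif_neg hsegne, offsetBS, dif_pos hcond]
      have hLseg : (seg.length : Int) = high + 1 - low := by rw [hseglen]; omega
      have hmid := PySem.Int.floordiv_two_mid_bounds (lo := low) (hi := high) hcond
      set mid := PySem.Int.floordiv (low + high) 2 with hmiddef
      have hm : PySem.Int.floordiv ((seg.length : Int) - 1) 2 = mid - low := by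
        rw [hLseg, hmiddef, PySem.Int.floordiv_eq_ediv_of_pos (by norm_num),
          PySem.Int.floordiv_eq_ediv_of_pos (by norm_num)]
        omega
      simp only [hm]
      have hidx : ((mid - low).toNat) < seg.length := by omega
      have hidxA : (mid.toNat) < starts.length := by omega
      have hget : PySem.List.pyGet? seg (mid - low) = some (seg[(mid - low).toNat]'hidx) :=
        PySem.List.pyGet?_eq_some_getElem seg (by omega) (by omega)
      have hgetA : PySem.List.pyGet? starts mid = some (starts[mid.toNat]'hidxA) :=
        PySem.List.pyGet?_eq_some_getElem starts (by omega) (by omega)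
      have hsegel : seg[(mid - low).toNat]'hidx = starts[mid.toNat]'hidxA := by
        simp only [hsegdef, List.getElem_take, List.getElem_drop]
        congr 1
        omega
      rw [hget, hgetA]
      simp only [Option.getD_some, hsegel]
      by_cases hc : starts[mid.toNat]'hidxA ≤ offset
      · rw [if_pos hc, if_pos hc]
        have hslice : PySem.List.slice seg (some (mid - low + 1)) none
            = (starts.drop (mid + 1).toNat).take (high + 1 - (mid + 1)).toNat := by
          rw [show mid - low + 1 = (((mid - low + 1).toNat : Nat) : Int) by omega,
            PySem.List.slice_from_natCast, hsegdef, List.drop_take, List.drop_drop]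
          congr 1
          · omega
          · congr 1
            omega
        rw [hslice, show low + (mid - low) + 1 = mid + 1 by ring]
        exact ih (mid + 1) high (by omega) (by omega) (by omega) hn
      · rw [if_neg hc, if_neg hc]
        have hslice : PySem.List.slice seg none (some (mid - low))
            = (starts.drop low.toNat).take (mid - 1 + 1 - low).toNat := by
          rw [show mid - low = (((mid - low).toNat : Nat) : Int) by omega,
            PySem.List.slice_to_natCast, hsegdef, List.take_take]
          congr 1
          omega
        rw [hslice]
        exact ih low (mid - 1) (by omega) h0 (by omega) (by omega)
    · -- loop over on both sides: seg is empty and low = high + 1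
      have ht : (high + 1 - low).toNat = 0 := by omega
      rw [ht]
      rw [segHalve, offsetBS]
      rw [dif_pos (by simp), dif_neg (by omega)]
      omega

-- ===== VERDICT (by name: the statement is the Claim_ definition above) =====
theorem offset_to_line_col_spec : Claim_equal_offset_to_line_col := by
  intro starts offset _hdom _hpre
  unfold Spec_offset_to_line_col offset_to_line_col offset_to_line_col_alt
  have h := segHalve_eq_offsetBS starts offset ((starts.length : Int) - 1 + 1 - 0).toNat
    0 ((starts.length : Int) - 1) (le_refl _) (by omega) (by omega) (by omega)
  have hseg : ((starts.drop (0 : Int).toNat).take ((starts.length : Int) - 1 + 1 - 0).toNat)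
      = starts := by
    simp only [Int.toNat_zero, List.drop_zero]
    rw [show ((starts.length : Int) - 1 + 1 - 0).toNat = starts.length by omega]
    exact List.take_length
  rw [hseg] at h
  rw [h]
  simp
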